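-- pv_equiv track=rewrite | github.com/Phani3108/dealframe | temporalos/intelligence/negotiation.py | _assess_escalation
-- ===== SOURCE A (Python) =====
-- _ESCALATION_SIGNALS = frozenset({
--     "escalate", "involve management", "legal review", "formal complaint",
--     "breach", "penalty", "consequences", "unacceptable", "walk away",
--     "deal breaker", "non-starter", "not acceptable",
-- })
--
-- _DEESCALATION_SIGNALS = frozenset({
--     "let's find a way", "work together", "compromise", "flexible",
--     "open to", "accommodate", "understand your position", "partnership",
--     "collaborate", "good faith", "appreciate", "reasonable",
-- })
--
-- def _assess_escalation(text: str) -> str: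
--     esc = sum(1 for kw in _ESCALATION_SIGNALS if kw in text)
--     deesc = sum(1 for kw in _DEESCALATION_SIGNALS if kw in text)
--     if esc > deesc and esc > 0:
--         return "escalating"
--     if deesc > esc and deesc > 0:
--         return "de_escalating"
--     return "stable"
-- ===== SOURCE B (Python) =====
-- _SIGNAL_WEIGHTS = {
--     "escalate": 1, "involve management": 1, "legal review": 1,
--     "formal complaint": 1, "breach": 1, "penalty": 1, "consequences": 1,
--     "unacceptable": 1, "walk away": 1, "deal breaker": 1, "non-starter": 1,
--     "not acceptable": 1,
--     "let's find a way": -1, "work together": -1, "compromise": -1,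
--     "flexible": -1, "open to": -1, "accommodate": -1,
--     "understand your position": -1, "partnership": -1, "collaborate": -1,
--     "good faith": -1, "appreciate": -1, "reasonable": -1,
-- }
--
-- def _assess_escalation(text: str) -> str:
--     score = 0
--     for kw, w in _SIGNAL_WEIGHTS.items():
--         if kw in text:
--             score += w
--     if score > 0:
--         return "escalating"
--     if score < 0:
--         return "de_escalating"
--     return "stable"
-- ===== Notes on version B (the rewrite author's own statement) =====
-- stated objective: simpler
-- what changed: Replaced the two separate keyword counts and the redundant double-guarded comparison with a single weighted-keyword map accumulated into one net score and a plain sign test (esc>deesc already implies esc>0, so the guards collapse).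
import Mathlib
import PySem

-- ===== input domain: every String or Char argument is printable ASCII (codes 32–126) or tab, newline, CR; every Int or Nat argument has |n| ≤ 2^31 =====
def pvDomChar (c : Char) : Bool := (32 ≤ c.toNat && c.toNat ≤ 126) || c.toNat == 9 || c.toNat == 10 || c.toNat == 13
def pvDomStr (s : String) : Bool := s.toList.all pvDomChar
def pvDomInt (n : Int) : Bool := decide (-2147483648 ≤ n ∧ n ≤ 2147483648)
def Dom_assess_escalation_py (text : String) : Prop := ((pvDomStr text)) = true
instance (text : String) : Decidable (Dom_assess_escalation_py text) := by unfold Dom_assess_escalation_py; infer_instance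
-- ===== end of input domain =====

-- B replaces the two separate keyword counts and double-guarded comparison by one
-- weighted keyword map folded into a single net score and a plain sign test (simpler).

-- ===== PORT A =====
def pvEscSignals : List String :=
  ["escalate", "involve management", "legal review", "formal complaint",
   "breach", "penalty", "consequences", "unacceptable", "walk away",
   "deal breaker", "non-starter", "not acceptable"]

def pvDeescSignals : List String :=
  ["let's find a way", "work together", "compromise", "flexible",
   "open to", "accommodate", "understand your position", "partnership",
   "collaborate", "good faith", "appreciate", "reasonable"]

def assess_escalation_py (text : String) : String :=
  let esc : Int := pvEscSignals.foldl (fun acc kw => acc + (if PySem.Str.isIn kw text then 1 else 0)) 0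
  let deesc : Int := pvDeescSignals.foldl (fun acc kw => acc + (if PySem.Str.isIn kw text then 1 else 0)) 0
  if esc > deesc ∧ esc > 0 then "escalating"
  else if deesc > esc ∧ deesc > 0 then "de_escalating"
  else "stable"

-- ===== PORT B =====
def pvSignalWeights : List (String × Int) :=
  [("escalate", 1), ("involve management", 1), ("legal review", 1),
   ("formal complaint", 1), ("breach", 1), ("penalty", 1), ("consequences", 1),
   ("unacceptable", 1), ("walk away", 1), ("deal breaker", 1), ("non-starter", 1),
   ("not acceptable", 1),
   ("let's find a way", -1), ("work together", -1), ("compromise", -1),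
   ("flexible", -1), ("open to", -1), ("accommodate", -1),
   ("understand your position", -1), ("partnership", -1), ("collaborate", -1),
   ("good faith", -1), ("appreciate", -1), ("reasonable", -1)]

def assess_escalation_py_alt (text : String) : String :=
  let score : Int := pvSignalWeights.foldl
    (fun acc p => if PySem.Str.isIn p.1 text then acc + p.2 else acc) 0
  if score > 0 then "escalating"
  else if score < 0 then "de_escalating"
  else "stable"

-- ===== PRECONDITION & SPEC =====
def Spec_assess_escalation_py (text : String) (out : String) : Prop := out = assess_escalation_py_alt text
instance (text : String) (out : String) : Decidable (Spec_assess_escalation_py text out) := by unfold Spec_assess_escalation_py; infer_instance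

-- ===== CLAIM (what is proved, stated in full; the proofs are below) =====
def Claim_equal_assess_escalation_py : Prop := ∀ (text : String), Dom_assess_escalation_py text → Spec_assess_escalation_py text (assess_escalation_py text)

-- ===== LEMMAS AND PROOFS =====

-- A's count fold equals a countP.
theorem pv_count_fold (text : String) (l : List String) (a : Int) :
    l.foldl (fun acc kw => acc + (if PySem.Str.isIn kw text then 1 else 0)) a
      = a + (l.countP (fun kw => PySem.Str.isIn kw text) : Int) := by
  induction l generalizing a with
  | nil => simp
  | cons x xs ih =>
    simp only [List.foldl_cons, List.countP_cons, ih]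
    split_ifs <;> push_cast <;> ring

-- B's score fold over a constant-weight map section.
theorem pv_score_fold (text : String) (w : Int) (l : List String) (a : Int) :
    (l.map (fun k => (k, w))).foldl
        (fun acc p => if PySem.Str.isIn p.1 text then acc + p.2 else acc) a
      = a + w * (l.countP (fun kw => PySem.Str.isIn kw text) : Int) := by
  induction l generalizing a with
  | nil => simp
  | cons x xs ih =>
    simp only [List.map_cons, List.foldl_cons, List.countP_cons, ih]
    split_ifs <;> push_cast <;> ring

theorem pv_weights_split :
    pvSignalWeights
      = pvEscSignals.map (fun k => (k, (1 : Int)))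
        ++ pvDeescSignals.map (fun k => (k, (-1 : Int))) := rfl

-- ===== VERDICT (by name: the statement is the Claim_ definition above) =====
theorem assess_escalation_py_spec : Claim_equal_assess_escalation_py := by
  intro text _
  unfold Spec_assess_escalation_py assess_escalation_py assess_escalation_py_alt
  rw [pv_weights_split, List.foldl_append, pv_score_fold, pv_score_fold, pv_count_fold, pv_count_fold]
  set e := pvEscSignals.countP (fun kw => PySem.Str.isIn kw text) with he
  set d := pvDeescSignals.countP (fun kw => PySem.Str.isIn kw text) with hd
  simp only []
  split_ifs <;> first | rfl | omega
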